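-- pv_equiv track=rewrite | github.com/zig-kwin-hu/uie- | src/process_embedding.py | collect_clusters
-- ===== SOURCE A (Python) =====
-- def collect_clusters(labels, id2instance, cluster_hierarchy=0, local_id=0):
--     cluster2instances = {}
--     label2globalid = {}
--     for i, label in enumerate(labels):
--         if label == -1:
--             continue
--         if label not in label2globalid:
--             global_id = str(cluster_hierarchy)+'_'+str(local_id)
--             label2globalid[label] = global_id
--             cluster2instances[global_id] = []
--             local_id += 1
--         cluster2instances[label2globalid[label]].append(id2instance[i])
--     return cluster2instances, local_id
-- ===== SOURCE B (Python) =====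
-- def collect_clusters(labels, id2instance, cluster_hierarchy=0, local_id=0):
--     groups = {}
--     for i, label in enumerate(labels):
--         if label != -1:
--             groups.setdefault(label, []).append(id2instance[i])
--     cluster2instances = {}
--     for members in groups.values():
--         cluster2instances[str(cluster_hierarchy) + '_' + str(local_id)] = members
--         local_id += 1
--     return cluster2instances, local_id
-- ===== Notes on version B (the rewrite author's own statement) =====
-- stated objective: simpler
-- what changed: B splits the work into two passes: a plain label->members grouping loop with no ID bookkeeping, then a second loop over the groups that assigns sequential global ids; A interleaves ID assignment and two dict updates inside one loop.
import Mathlib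
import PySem

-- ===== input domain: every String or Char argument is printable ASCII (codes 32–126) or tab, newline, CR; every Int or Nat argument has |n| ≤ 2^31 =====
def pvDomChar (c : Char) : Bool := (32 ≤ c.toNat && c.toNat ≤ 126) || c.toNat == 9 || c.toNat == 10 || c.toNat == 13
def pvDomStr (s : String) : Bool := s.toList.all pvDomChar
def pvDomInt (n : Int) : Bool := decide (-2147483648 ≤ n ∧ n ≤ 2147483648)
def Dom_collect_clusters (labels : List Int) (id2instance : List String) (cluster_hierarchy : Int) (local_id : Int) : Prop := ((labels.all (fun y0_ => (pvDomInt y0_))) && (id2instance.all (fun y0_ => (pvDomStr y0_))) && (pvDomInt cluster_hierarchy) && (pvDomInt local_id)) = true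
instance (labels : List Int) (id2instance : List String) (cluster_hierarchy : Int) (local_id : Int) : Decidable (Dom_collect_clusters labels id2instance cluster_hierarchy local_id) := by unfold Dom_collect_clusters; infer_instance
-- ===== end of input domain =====

-- B regroups the work into two passes (pure grouping, then sequential id assignment); equivalence of the return value, proved for all inputs where the Python returns (Pre_ excludes IndexError).

-- ===== PORT A =====
-- A-side helper: the body of A's single loop over enumerate(labels)
def pvStepA (id2 : List String) (ch : Int)
    (st : PySem.Dict String (List String) × PySem.Dict Int String × Int) (p : Int × Int) :
    PySem.Dict String (List String) × PySem.Dict Int String × Int :=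
  if p.2 = -1 then st
  else
    let st1 :=
      if st.2.1.contains p.2 = false then
        let globalId := PySem.Int.toStr ch ++ "_" ++ PySem.Int.toStr st.2.2
        (st.1.insert globalId [], st.2.1.insert p.2 globalId, st.2.2 + 1)
      else st
    (st1.1.modify ((st1.2.1.get? p.2).getD "") [] (· ++ [(PySem.List.pyGet? id2 p.1).getD ""]),
     st1.2.1, st1.2.2)

def collect_clusters (labels : List Int) (id2instance : List String) (cluster_hierarchy : Int) (local_id : Int) : (List (String × List String)) × Int :=
  let st := (PySem.List.enumerate labels).foldl (pvStepA id2instance cluster_hierarchy)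
    (PySem.Dict.empty, PySem.Dict.empty, local_id)
  (st.1.items, st.2.2)

-- ===== PORT B =====
-- B-side helpers: pass 1 (grouping) and pass 2 (id assignment) loop bodies
def pvStepB1 (id2 : List String) (g : PySem.Dict Int (List String)) (p : Int × Int) :
    PySem.Dict Int (List String) :=
  if p.2 ≠ -1 then g.modify p.2 [] (· ++ [(PySem.List.pyGet? id2 p.1).getD ""]) else g

def pvStepB2 (ch : Int) (st : PySem.Dict String (List String) × Int) (members : List String) :
    PySem.Dict String (List String) × Int :=
  (st.1.insert (PySem.Int.toStr ch ++ "_" ++ PySem.Int.toStr st.2) members, st.2 + 1)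

def collect_clusters_alt (labels : List Int) (id2instance : List String) (cluster_hierarchy : Int) (local_id : Int) : (List (String × List String)) × Int :=
  let groups := (PySem.List.enumerate labels).foldl (pvStepB1 id2instance) PySem.Dict.empty
  let fin := groups.values.foldl (pvStepB2 cluster_hierarchy) (PySem.Dict.empty, local_id)
  (fin.1.items, fin.2)

-- ===== PRECONDITION & SPEC =====
-- Pre_ excludes exactly the inputs where A raises IndexError: a position with label ≠ -1 beyond the end of id2instance.
def Pre_collect_clusters (labels : List Int) (id2instance : List String) (cluster_hierarchy : Int) (local_id : Int) : Prop :=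
  ∀ i : Nat, (h : i < labels.length) → labels[i] ≠ -1 → i < id2instance.length
instance (labels : List Int) (id2instance : List String) (cluster_hierarchy : Int) (local_id : Int) : Decidable (Pre_collect_clusters labels id2instance cluster_hierarchy local_id) := by unfold Pre_collect_clusters; infer_instance

def pvWitness_collect_clusters : List Int × List String × Int × Int := ([0, -1, 0, 1], ["a", "b", "c", "d"], 2, 5)

def Spec_collect_clusters (labels : List Int) (id2instance : List String) (cluster_hierarchy : Int) (local_id : Int) (out : (List (String × List String)) × Int) : Prop := out = collect_clusters_alt labels id2instance cluster_hierarchy local_id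
instance (labels : List Int) (id2instance : List String) (cluster_hierarchy : Int) (local_id : Int) (out : (List (String × List String)) × Int) : Decidable (Spec_collect_clusters labels id2instance cluster_hierarchy local_id out) := by unfold Spec_collect_clusters; infer_instance

-- ===== CLAIM (what is proved, stated in full; the proofs are below) =====
def Claim_equal_collect_clusters : Prop := ∀ (labels : List Int) (id2instance : List String) (cluster_hierarchy : Int) (local_id : Int), Dom_collect_clusters labels id2instance cluster_hierarchy local_id → Pre_collect_clusters labels id2instance cluster_hierarchy local_id → Spec_collect_clusters labels id2instance cluster_hierarchy local_id (collect_clusters labels id2instance cluster_hierarchy local_id)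

-- ===== LEMMAS AND PROOFS =====

lemma pv_digitChar_inj (a b : Nat) (ha : a < 10) (hb : b < 10)
    (h : Nat.digitChar a = Nat.digitChar b) : a = b := by
  interval_cases a <;> interval_cases b <;> revert h <;> decide

lemma pv_tdc_spec (n : Nat) : ∀ fuel ds, n < fuel →
    Nat.toDigitsCore 10 fuel n ds = Nat.toDigits 10 n ++ ds := by
  induction n using Nat.strong_induction_on with
  | _ n ih =>
    intro fuel ds hf
    obtain ⟨f, rfl⟩ : ∃ f, fuel = f + 1 := ⟨fuel - 1, by omega⟩
    rw [Nat.toDigits]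
    rw [Nat.toDigitsCore, Nat.toDigitsCore]
    by_cases h0 : n / 10 = 0
    · simp [h0]
    · simp only [h0, if_false]
      have hlt : n / 10 < n := Nat.div_lt_self (by omega) (by omega)
      rw [ih (n / 10) hlt f _ (by omega), ih (n / 10) hlt n _ (by omega)]
      simp

lemma pv_toDigits_ten (n : Nat) :
    Nat.toDigits 10 n = (if n < 10 then [] else Nat.toDigits 10 (n / 10)) ++ [Nat.digitChar (n % 10)] := by
  rw [Nat.toDigits, Nat.toDigitsCore]
  by_cases h0 : n / 10 = 0
  · have : n < 10 := by omega
    simp [h0, this]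
  · have : ¬ n < 10 := by omega
    simp only [h0, if_false, this]
    rw [pv_tdc_spec (n / 10) n _ (by have := Nat.div_lt_self (by omega : 0 < n) (by omega : 1 < 10); omega)]

lemma pv_toDigits_ne_nil (n : Nat) : Nat.toDigits 10 n ≠ [] := by
  rw [pv_toDigits_ten]; simp

lemma pv_mem_toDigits (n : Nat) : ∀ c : Char, c ∈ Nat.toDigits 10 n →
    ∃ d, d < 10 ∧ c = Nat.digitChar d := by
  induction n using Nat.strong_induction_on with
  | _ n ih =>
    intro c h
    rw [pv_toDigits_ten] at h
    rcases List.mem_append.1 h with h | h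
    · split_ifs at h with hn
      · simp at h
      · exact ih (n / 10) (Nat.div_lt_self (by omega) (by omega)) c h
    · simp at h
      exact ⟨n % 10, Nat.mod_lt _ (by omega), h⟩

lemma pv_toDigits_injective (a : Nat) : ∀ b, Nat.toDigits 10 a = Nat.toDigits 10 b → a = b := by
  induction a using Nat.strong_induction_on with
  | _ a ih =>
    intro b h
    rw [pv_toDigits_ten a, pv_toDigits_ten b] at h
    obtain ⟨h1, h2⟩ := List.append_inj' h rfl
    simp at h2
    by_cases ha : a < 10 <;> by_cases hb : b < 10
    · have := pv_digitChar_inj _ _ (Nat.mod_lt _ (by omega)) (Nat.mod_lt _ (by omega)) h2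
      omega
    · simp [ha, hb] at h1; exact absurd h1 (pv_toDigits_ne_nil _)
    · simp [ha, hb] at h1; exact absurd h1 (pv_toDigits_ne_nil _)
    · simp [ha, hb] at h1
      have hd := ih (a / 10) (Nat.div_lt_self (by omega) (by omega)) _ h1
      have hm := pv_digitChar_inj _ _ (Nat.mod_lt _ (by omega)) (Nat.mod_lt _ (by omega)) h2
      omega

lemma pv_digitChar_ne_dash (d : Nat) (h : d < 10) : Nat.digitChar d ≠ '-' := by
  interval_cases d <;> decide

lemma pv_toChars_inj (a b : Int) (h : PySem.Int.toChars a = PySem.Int.toChars b) : a = b := by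
  unfold PySem.Int.toChars at h
  split_ifs at h with h1 h2 h2
  · simp at h
    have := pv_toDigits_injective _ _ h
    omega
  · have : '-' ∈ Nat.toDigits 10 b.toNat := h ▸ List.mem_cons_self ..
    obtain ⟨d, hd, hc⟩ := pv_mem_toDigits _ _ this
    exact absurd hc.symm (pv_digitChar_ne_dash d hd)
  · have : '-' ∈ Nat.toDigits 10 a.toNat := h.symm ▸ List.mem_cons_self ..
    obtain ⟨d, hd, hc⟩ := pv_mem_toDigits _ _ this
    exact absurd hc.symm (pv_digitChar_ne_dash d hd)
  · have := pv_toDigits_injective _ _ h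
    omega

def pvGid (ch n : Int) : String := PySem.Int.toStr ch ++ "_" ++ PySem.Int.toStr n

lemma pvGid_inj (ch : Int) {a b : Int} (h : pvGid ch a = pvGid ch b) : a = b := by
  have h2 := congrArg String.toList h
  simp only [pvGid, String.toList_append, PySem.Int.toList_toStr, List.append_assoc] at h2
  have h3 := List.append_cancel_left h2
  have h4 := List.append_cancel_left h3
  exact pv_toChars_inj _ _ h4

lemma pvGid_bne (ch : Int) {a b : Int} (h : a ≠ b) : (pvGid ch a == pvGid ch b) = false := by
  rw [beq_eq_false_iff_ne]
  exact fun hc => h (pvGid_inj ch hc)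

def pvRender (ch : Int) : List (Int × List String) → Int → List (String × List String)
  | [], _ => []
  | p :: t, n => (pvGid ch n, p.2) :: pvRender ch t (n + 1)

def pvLmap (ch : Int) : List (Int × List String) → Int → List (Int × String)
  | [], _ => []
  | p :: t, n => (p.1, pvGid ch n) :: pvLmap ch t (n + 1)

def pvGUpd (lab : Int) (v : String) (g : List (Int × List String)) : List (Int × List String) :=
  g.map (fun q => if q.1 == lab then (q.1, q.2 ++ [v]) else q)

lemma pv_lmap_any (ch lab : Int) : ∀ (g : List (Int × List String)) (n : Int),
    ((pvLmap ch g n).any (·.1 == lab)) = g.any (·.1 == lab) := by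
  intro g
  induction g with
  | nil => intro n; rfl
  | cons q t ih => intro n; simp [pvLmap, ih]

lemma pv_render_any_out (ch : Int) : ∀ (g : List (Int × List String)) (n m : Int),
    (m < n ∨ n + (g.length : Int) ≤ m) →
    ((pvRender ch g n).any (·.1 == pvGid ch m)) = false := by
  intro g
  induction g with
  | nil => intro n m _; rfl
  | cons q t ih =>
    intro n m hr
    simp only [pvRender, List.any_cons, Bool.or_eq_false_iff]
    constructor
    · exact pvGid_bne ch (by simp at hr; omega)
    · exact ih (n + 1) m (by simp at hr ⊢; omega)

lemma pv_render_append (ch : Int) : ∀ (g : List (Int × List String)) (n : Int) (q : Int × List String),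
    pvRender ch (g ++ [q]) n = pvRender ch g n ++ [(pvGid ch (n + g.length), q.2)] := by
  intro g
  induction g with
  | nil => intro n q; simp [pvRender]
  | cons p t ih =>
    intro n q
    simp only [List.cons_append, pvRender, ih, List.length_cons]
    rw [show (n + ((t.length + 1 : Nat) : Int)) = ((n + 1) + (t.length : Int)) by push_cast; ring]

lemma pv_lmap_append (ch : Int) : ∀ (g : List (Int × List String)) (n : Int) (q : Int × List String),
    pvLmap ch (g ++ [q]) n = pvLmap ch g n ++ [(q.1, pvGid ch (n + g.length))] := by
  intro g
  induction g with
  | nil => intro n q; simp [pvLmap]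
  | cons p t ih =>
    intro n q
    simp only [List.cons_append, pvLmap, ih, List.length_cons]
    rw [show (n + ((t.length + 1 : Nat) : Int)) = ((n + 1) + (t.length : Int)) by push_cast; ring]

lemma pv_gUpd_keys (lab : Int) (v : String) (g : List (Int × List String)) :
    (pvGUpd lab v g).map (·.1) = g.map (·.1) := by
  induction g with
  | nil => rfl
  | cons q t ih =>
    simp only [pvGUpd, List.map_cons] at ih ⊢
    rw [ih]
    by_cases h : q.1 == lab <;> simp [h]

lemma pv_gUpd_length (lab : Int) (v : String) (g : List (Int × List String)) :
    (pvGUpd lab v g).length = g.length := by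
  simp [pvGUpd]

lemma pv_lmap_gUpd (ch lab : Int) (v : String) : ∀ (g : List (Int × List String)) (n : Int),
    pvLmap ch (pvGUpd lab v g) n = pvLmap ch g n := by
  intro g
  induction g with
  | nil => intro n; rfl
  | cons q t ih =>
    intro n
    by_cases h : q.1 == lab <;>
      simp only [pvGUpd, List.map_cons, pvLmap, h, if_true, if_false] <;>
      exact congrArg _ (by simpa [pvGUpd] using ih (n + 1))

lemma pv_gUpd_not_mem (lab : Int) (v : String) (g : List (Int × List String))
    (h : g.any (·.1 == lab) = false) : pvGUpd lab v g = g := by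
  induction g with
  | nil => rfl
  | cons q t ih =>
    simp only [List.any_cons, Bool.or_eq_false_iff] at h
    simp only [pvGUpd, List.map_cons, h.1, if_false]
    exact congrArg _ (by simpa [pvGUpd] using ih h.2)

lemma pv_replace_id {α β : Type} [BEq α] (k : α) (w : α × β) : ∀ (l : List (α × β)),
    l.any (·.1 == k) = false → l.map (fun p => if p.1 == k then w else p) = l := by
  intro l
  induction l with
  | nil => intro _; rfl
  | cons q t ih =>
    intro h
    simp only [List.any_cons, Bool.or_eq_false_iff] at h
    simp only [List.map_cons, h.1, if_false]
    exact congrArg _ (ih h.2)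

lemma pv_modify_cons {α β : Type} [BEq α] (k : α) (dflt : β) (f : β → β) (q : α × β) (l : List (α × β))
    (h : (q.1 == k) = false) :
    ((PySem.Dict.mk (q :: l)).modify k dflt f).items = q :: ((PySem.Dict.mk l).modify k dflt f).items := by
  simp only [PySem.Dict.modify, PySem.Dict.insert, PySem.Dict.contains, PySem.Dict.getD,
    PySem.Dict.get?, List.any_cons, List.find?_cons, h, Bool.false_or, if_false]
  by_cases hc : l.any (·.1 == k) = true <;> simp [hc, h]

lemma pv_lmap_get (ch lab : Int) : ∀ (g : List (Int × List String)) (n : Int),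
    g.any (·.1 == lab) = true →
    ∃ k : Nat, k < g.length ∧ ((PySem.Dict.mk (pvLmap ch g n)).get? lab).getD "" = pvGid ch (n + k) := by
  intro g
  induction g with
  | nil => intro n h; simp at h
  | cons q t ih =>
    intro n h
    by_cases hq : (q.1 == lab) = true
    · exact ⟨0, by simp, by simp [pvLmap, PySem.Dict.get?, List.find?_cons, hq]⟩
    · simp only [List.any_cons, hq, Bool.false_or] at h
      obtain ⟨k, hk, hg⟩ := ih (n + 1) h
      refine ⟨k + 1, by simp; omega, ?_⟩
      rw [show n + ((k + 1 : Nat) : Int) = (n + 1) + (k : Int) by push_cast; ring]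
      rw [← hg]
      simp [pvLmap, PySem.Dict.get?, List.find?_cons, hq]

lemma pv_B1_items (lab : Int) (v : String) : ∀ (g : List (Int × List String)),
    (g.map (·.1)).Nodup → g.any (·.1 == lab) = true →
    ((PySem.Dict.mk g).modify lab [] (· ++ [v])).items = pvGUpd lab v g := by
  intro g
  induction g with
  | nil => intro _ h; simp at h
  | cons q t ih =>
    intro hnd h
    simp only [List.map_cons, List.nodup_cons] at hnd
    by_cases hq : (q.1 == lab) = true
    · have hlab : q.1 = lab := by simpa using hq
      have htany : t.any (·.1 == lab) = false := by
        apply List.any_eq_false.mpr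
        intro p hp hc
        have hpl : p.1 = lab := by simpa using hc
        apply hnd.1
        rw [hlab, ← hpl]
        exact List.mem_map_of_mem hp
      simp only [PySem.Dict.modify, PySem.Dict.insert, PySem.Dict.contains, PySem.Dict.getD,
        PySem.Dict.get?, List.any_cons, List.find?_cons, hq, Bool.true_or, if_true]
      simp only [Option.map_some, Option.getD_some, pvGUpd, List.map_cons, hq, if_true]
      rw [hlab]
      rw [show (List.map (fun q => if (q.1 == lab) = true then (q.1, q.2 ++ [v]) else q) t) = t from by
        simpa [pvGUpd] using pv_gUpd_not_mem lab v t htany]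
      exact congrArg _ (pv_replace_id lab (lab, q.2 ++ [v]) t htany)
    · have hq' : (q.1 == lab) = false := by simpa using hq
      simp only [List.any_cons, hq', Bool.false_or] at h
      rw [pv_modify_cons _ _ _ _ _ hq']
      simp only [pvGUpd, List.map_cons, hq', if_false]
      exact congrArg _ (ih hnd.2 h)

lemma pv_A1_items (ch lab : Int) (v : String) : ∀ (g : List (Int × List String)) (n : Int),
    (g.map (·.1)).Nodup → g.any (·.1 == lab) = true →
    ((PySem.Dict.mk (pvRender ch g n)).modify (((PySem.Dict.mk (pvLmap ch g n)).get? lab).getD "") [] (· ++ [v])).items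
      = pvRender ch (pvGUpd lab v g) n := by
  intro g
  induction g with
  | nil => intro _ _ h; simp at h
  | cons q t ih =>
    intro n hnd h
    simp only [List.map_cons, List.nodup_cons] at hnd
    by_cases hq : (q.1 == lab) = true
    · have hlab : q.1 = lab := by simpa using hq
      have htany : t.any (·.1 == lab) = false := by
        apply List.any_eq_false.mpr
        intro p hp hc
        have hpl : p.1 = lab := by simpa using hc
        apply hnd.1
        rw [hlab, ← hpl]
        exact List.mem_map_of_mem hp
      have hrt : (pvRender ch t (n + 1)).any (·.1 == pvGid ch n) = false :=
        pv_render_any_out ch t (n + 1) n (Or.inl (by omega))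
      have hgd : ((PySem.Dict.mk (pvLmap ch (q :: t) n)).get? lab).getD "" = pvGid ch n := by
        simp [pvLmap, PySem.Dict.get?, hq]
      rw [hgd]
      simp only [pvRender, pvLmap, PySem.Dict.modify, PySem.Dict.insert, PySem.Dict.contains,
        PySem.Dict.getD, PySem.Dict.get?, List.any_cons, List.find?_cons, beq_self_eq_true,
        Bool.true_or, if_true, Option.map_some, Option.getD_some, List.map_cons, if_pos rfl]
      rw [pv_replace_id _ _ _ hrt]
      simp only [pvGUpd, List.map_cons, hq, if_true, pvRender]
      rw [show (List.map (fun q => if (q.1 == lab) = true then (q.1, q.2 ++ [v]) else q) t) = t from by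
        simpa [pvGUpd] using pv_gUpd_not_mem lab v t htany]
    · have hq' : (q.1 == lab) = false := by simpa using hq
      simp only [List.any_cons, hq', Bool.false_or] at h
      obtain ⟨k, hk, hgdt⟩ := pv_lmap_get ch lab t (n + 1) h
      have hgd : ((PySem.Dict.mk (pvLmap ch (q :: t) n)).get? lab).getD ""
          = ((PySem.Dict.mk (pvLmap ch t (n + 1))).get? lab).getD "" := by
        simp [pvLmap, PySem.Dict.get?, hq']
      have hne : ((pvGid ch n, q.2).1 == ((PySem.Dict.mk (pvLmap ch t (n + 1))).get? lab).getD "") = false := by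
        rw [hgdt]
        exact pvGid_bne ch (by omega)
      rw [hgd]
      simp only [pvRender]
      rw [pv_modify_cons _ _ _ _ _ hne]
      simp only [pvGUpd, List.map_cons, hq', if_false, pvRender]
      exact congrArg _ (by simpa [pvGUpd] using ih (n + 1) hnd.2 h)

lemma pv_any_false_find {α β : Type} [BEq α] (l : List (α × β)) (k : α)
    (h : l.any (·.1 == k) = false) : List.find? (fun p => p.1 == k) l = none :=
  List.find?_eq_none.mpr (fun p hp => by
    have := (List.any_eq_false.mp h) p hp
    simpa using this)

lemma pv_loop_eq (id2 : List String) (ch : Int) : ∀ (L : List (Int × Int)) (g : List (Int × List String)) (n : Int),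
    (g.map (·.1)).Nodup →
    L.foldl (pvStepA id2 ch) (PySem.Dict.mk (pvRender ch g n), PySem.Dict.mk (pvLmap ch g n), n + g.length)
      = (PySem.Dict.mk (pvRender ch (L.foldl (pvStepB1 id2) (PySem.Dict.mk g)).items n),
         PySem.Dict.mk (pvLmap ch (L.foldl (pvStepB1 id2) (PySem.Dict.mk g)).items n),
         n + ((L.foldl (pvStepB1 id2) (PySem.Dict.mk g)).items.length : Int)) := by
  intro L
  induction L with
  | nil => intro g n _; rfl
  | cons p L' ih =>
    intro g n hnd
    set lab := p.2 with hlab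
    set v := (PySem.List.pyGet? id2 p.1).getD "" with hv
    simp only [List.foldl_cons]
    by_cases hm1 : lab = -1
    · have hA : pvStepA id2 ch (PySem.Dict.mk (pvRender ch g n), PySem.Dict.mk (pvLmap ch g n), n + g.length) p
          = (PySem.Dict.mk (pvRender ch g n), PySem.Dict.mk (pvLmap ch g n), n + g.length) := by
        simp [pvStepA, ← hlab, hm1]
      have hB : pvStepB1 id2 (PySem.Dict.mk g) p = PySem.Dict.mk g := by
        simp [pvStepB1, ← hlab, hm1]
      rw [hA, hB]
      exact ih g n hnd
    · by_cases hpres : g.any (·.1 == lab) = true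
      · -- label already grouped
        have hcont : (PySem.Dict.mk (pvLmap ch g n)).contains lab = true := by
          simpa [PySem.Dict.contains, pv_lmap_any] using hpres
        have hA : pvStepA id2 ch (PySem.Dict.mk (pvRender ch g n), PySem.Dict.mk (pvLmap ch g n), n + g.length) p
            = (PySem.Dict.mk (pvRender ch (pvGUpd lab v g) n), PySem.Dict.mk (pvLmap ch (pvGUpd lab v g) n),
               n + ((pvGUpd lab v g).length : Int)) := by
          simp only [pvStepA, ← hlab, ← hv, hm1, if_false, hcont, Bool.true_eq_false]
          apply Prod.ext
          · apply PySem.Dict.ext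
            exact pv_A1_items ch lab v g n hnd hpres
          · apply Prod.ext
            · simp [pv_lmap_gUpd]
            · simp [pv_gUpd_length]
        have hB : pvStepB1 id2 (PySem.Dict.mk g) p = PySem.Dict.mk (pvGUpd lab v g) := by
          simp only [pvStepB1, ← hlab, ← hv, hm1, ne_eq, not_false_iff, if_true]
          apply PySem.Dict.ext
          exact pv_B1_items lab v g hnd hpres
        rw [hA, hB]
        have hnd' : ((pvGUpd lab v g).map (·.1)).Nodup := by rw [pv_gUpd_keys]; exact hnd
        exact ih (pvGUpd lab v g) n hnd'
      · -- fresh label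
        have hany : g.any (·.1 == lab) = false := by
          cases hx : g.any (·.1 == lab) with
          | false => rfl
          | true => exact absurd hx hpres
        have hcont : (PySem.Dict.mk (pvLmap ch g n)).contains lab = false := by
          simpa [PySem.Dict.contains, pv_lmap_any] using hany
        have hrfresh : (pvRender ch g n).any (·.1 == pvGid ch (n + g.length)) = false :=
          pv_render_any_out ch g n (n + g.length) (Or.inr (by omega))
        set g1 : List (Int × List String) := g ++ [(lab, [])] with hg1
        set g2 : List (Int × List String) := g ++ [(lab, [v])] with hg2
        have hnotin : lab ∉ g.map (·.1) := by
          intro ha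
          obtain ⟨q, hq, hql⟩ := List.mem_map.mp ha
          have := List.any_eq_false.mp hany q hq
          simp [hql] at this
        have hnd1 : (g1.map (·.1)).Nodup := by
          rw [hg1]
          simp only [List.map_append, List.map_cons, List.map_nil]
          exact List.Nodup.append hnd (List.nodup_singleton _)
            (by simpa [List.disjoint_singleton] using hnotin)
        have hpres1 : g1.any (·.1 == lab) = true := by rw [hg1]; simp
        have hA : pvStepA id2 ch (PySem.Dict.mk (pvRender ch g n), PySem.Dict.mk (pvLmap ch g n), n + g.length) p
            = (PySem.Dict.mk (pvRender ch (pvGUpd lab v g1) n), PySem.Dict.mk (pvLmap ch g1 n),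
               n + (g1.length : Int)) := by
          simp only [pvStepA, ← hlab, ← hv, hm1, if_false, hcont, if_true]
          have hkey : (PySem.Int.toStr ch ++ "_" ++ PySem.Int.toStr (n + (g.length : Int))) = pvGid ch (n + g.length) := rfl
          have e1 : (PySem.Dict.mk (pvRender ch g n)).insert (PySem.Int.toStr ch ++ "_" ++ PySem.Int.toStr (n + ↑g.length)) []
              = PySem.Dict.mk (pvRender ch g1 n) := by
            apply PySem.Dict.ext
            simp only [PySem.Dict.insert, PySem.Dict.contains, hkey, hrfresh, Bool.false_eq_true, if_false]
            rw [hg1, pv_render_append]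
          have e2 : (PySem.Dict.mk (pvLmap ch g n)).insert lab (PySem.Int.toStr ch ++ "_" ++ PySem.Int.toStr (n + ↑g.length))
              = PySem.Dict.mk (pvLmap ch g1 n) := by
            apply PySem.Dict.ext
            simp only [PySem.Dict.insert, PySem.Dict.contains]
            rw [show ((pvLmap ch g n).any fun p => p.1 == lab) = false by rw [pv_lmap_any]; exact hany]
            simp only [Bool.false_eq_true, if_false]
            rw [hg1, pv_lmap_append]
            rfl
          rw [e1, e2]
          apply Prod.ext
          · apply PySem.Dict.ext
            exact pv_A1_items ch lab v g1 n hnd1 hpres1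
          · apply Prod.ext
            · rfl
            · simp only [hg1, List.length_append, List.length_cons, List.length_nil]
              push_cast
              ring
        have hB : pvStepB1 id2 (PySem.Dict.mk g) p = PySem.Dict.mk g2 := by
          simp only [pvStepB1, ← hlab, ← hv, hm1, ne_eq, not_false_iff, if_true]
          apply PySem.Dict.ext
          simp only [PySem.Dict.modify, PySem.Dict.insert, PySem.Dict.contains, PySem.Dict.getD,
            PySem.Dict.get?, hany, Bool.false_eq_true, if_false]
          rw [pv_any_false_find _ _ hany]
          rfl
        have hupd : pvGUpd lab v g1 = g2 := by
          rw [hg1, hg2]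
          unfold pvGUpd
          rw [List.map_append]
          rw [show List.map (fun q => if (q.1 == lab) = true then (q.1, q.2 ++ [v]) else q) g = g from by
            simpa [pvGUpd] using pv_gUpd_not_mem lab v g hany]
          simp
        have hnd2 : (g2.map (·.1)).Nodup := by
          rw [← hupd, pv_gUpd_keys]
          exact hnd1
        have hlm : pvLmap ch g1 n = pvLmap ch g2 n := by
          rw [hg1, hg2, pv_lmap_append, pv_lmap_append]
        have hlen : (g1.length : Int) = (g2.length : Int) := by simp [hg1, hg2]
        rw [hA, hB, hupd, hlm, hlen]
        exact ih g2 n hnd2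

lemma pv_pass2 (ch : Int) : ∀ (g : List (Int × List String)) (acc : List (String × List String)) (n : Int),
    (∀ s ∈ acc.map (·.1), ∃ m : Int, m < n ∧ s = pvGid ch m) →
    (g.map (·.2)).foldl (pvStepB2 ch) (PySem.Dict.mk acc, n)
      = (PySem.Dict.mk (acc ++ pvRender ch g n), n + g.length) := by
  intro g
  induction g with
  | nil => intro acc n _; simp [pvRender]
  | cons q t ih =>
    intro acc n hacc
    have hfresh : (acc.any (·.1 == pvGid ch n)) = false := by
      apply List.any_eq_false.mpr
      intro p hp hc
      obtain ⟨m, hm, hs⟩ := hacc p.1 (List.mem_map_of_mem hp)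
      have : p.1 = pvGid ch n := by simpa using hc
      rw [hs] at this
      exact absurd (pvGid_inj ch this) (by omega)
    have hstep : pvStepB2 ch (PySem.Dict.mk acc, n) q.2
        = (PySem.Dict.mk (acc ++ [(pvGid ch n, q.2)]), n + 1) := by
      unfold pvStepB2
      have hkey : (PySem.Int.toStr ch ++ "_" ++ PySem.Int.toStr n) = pvGid ch n := rfl
      apply Prod.ext
      · apply PySem.Dict.ext
        simp only [PySem.Dict.insert, PySem.Dict.contains, hkey, hfresh, Bool.false_eq_true, if_false]
      · rfl
    simp only [List.map_cons, List.foldl_cons, hstep]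
    rw [ih (acc ++ [(pvGid ch n, q.2)]) (n + 1) ?_]
    · rw [List.append_assoc]
      simp only [pvRender, List.length_cons, List.singleton_append]
      rw [show n + 1 + (t.length : Int) = n + ((t.length + 1 : Nat) : Int) by push_cast; ring]
    · intro s hs
      rw [List.map_append] at hs
      rcases List.mem_append.mp hs with h | h
      · obtain ⟨m, hm, hsm⟩ := hacc s h
        exact ⟨m, by omega, hsm⟩
      · simp at h
        exact ⟨n, by omega, h⟩

theorem pv_main (labels : List Int) (id2 : List String) (ch lid : Int) :
    collect_clusters labels id2 ch lid = collect_clusters_alt labels id2 ch lid := by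
  unfold collect_clusters collect_clusters_alt
  have h0 : (PySem.Dict.empty : PySem.Dict String (List String)) = PySem.Dict.mk [] := rfl
  have h0' : (PySem.Dict.empty : PySem.Dict Int (List String)) = PySem.Dict.mk [] := rfl
  have h0'' : (PySem.Dict.empty : PySem.Dict Int String) = PySem.Dict.mk [] := rfl
  set G := (PySem.List.enumerate labels).foldl (pvStepB1 id2) PySem.Dict.empty with hG
  have hstart : ((PySem.Dict.empty : PySem.Dict String (List String)),
      (PySem.Dict.empty : PySem.Dict Int String), lid)
      = (PySem.Dict.mk (pvRender ch ([] : List (Int × List String)) lid),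
         PySem.Dict.mk (pvLmap ch ([] : List (Int × List String)) lid),
         lid + (([] : List (Int × List String)).length : Int)) := by
    simp [pvRender, pvLmap, h0, h0'']
  have hloop := pv_loop_eq id2 ch (PySem.List.enumerate labels) [] lid (by simp)
  rw [h0'] at hG
  have hpass := pv_pass2 ch G.items [] lid (by simp)
  have hvals : G.values = G.items.map (·.2) := rfl
  simp only [hstart, ← hG] at hloop ⊢
  rw [hloop]
  rw [hvals, h0, hpass]
  simp

-- ===== VERDICT (by name: the statement is the Claim_ definition above) =====
theorem collect_clusters_spec : Claim_equal_collect_clusters := by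
  intro labels id2instance cluster_hierarchy local_id _ _
  unfold Spec_collect_clusters
  exact pv_main labels id2instance cluster_hierarchy local_id
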